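-- pv_equiv track=rewrite | github.com/Studio-des-parfums/lylo-back | app/routers/sessions.py | _canonical_choice
-- ===== SOURCE A (Python) =====
-- import unicodedata
--
-- def _normalize(s: str) -> str:
--     """Lowercase + supprime les accents pour comparaison souple."""
--     return "".join(
--         c for c in unicodedata.normalize("NFD", s.lower())
--         if unicodedata.category(c) != "Mn"
--     )
--
-- def _canonical_choice(submitted: str, valid_labels: list[str]) -> str:
--     """Retourne le label canonique le plus proche parmi valid_labels.
--
--     Ordre de priorité :
--     1. Correspondance exacte (insensible à la casse/accents)
--     2. Correspondance du préfixe avant " - " (insensible à la casse/accents)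
--     3. Le label canonique dont le préfixe normalisé contient le texte soumis
--     4. Valeur soumise inchangée si aucun match
--     """
--     norm_submitted = _normalize(submitted)
--     # Préfixe soumis (avant " - ")
--     submitted_prefix = norm_submitted.split(" - ")[0].strip()
--
--     for label in valid_labels:
--         if _normalize(label) == norm_submitted:
--             return label
--
--     for label in valid_labels:
--         label_prefix = _normalize(label).split(" - ")[0].strip()
--         if label_prefix == submitted_prefix:
--             return label
--
--     for label in valid_labels:
--         label_prefix = _normalize(label).split(" - ")[0].strip()
--         if submitted_prefix in label_prefix or label_prefix in submitted_prefix: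
--             return label
--
--     return submitted
-- ===== SOURCE B (Python) =====
-- import unicodedata
--
-- def _normalize(s: str) -> str:
--     return "".join(
--         c for c in unicodedata.normalize("NFD", s.lower())
--         if unicodedata.category(c) != "Mn"
--     )
--
-- def _prefix(s: str) -> str:
--     return s.split(" - ")[0].strip()
--
-- def _canonical_choice(submitted: str, valid_labels: list[str]) -> str:
--     norm_submitted = _normalize(submitted)
--     submitted_prefix = _prefix(norm_submitted)
--     best = None  # (priority, label): earliest label with the lowest priority so far
--     for label in valid_labels:
--         nl = _normalize(label)
--         if nl == norm_submitted:  # priority 1 is minimal: first exact match wins outright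
--             best = (1, label)
--             break
--         lp = _prefix(nl)
--         if lp == submitted_prefix:
--             p = 2
--         elif submitted_prefix in lp or lp in submitted_prefix:
--             p = 3
--         else:
--             continue
--         if best is None or p < best[0]:
--             best = (p, label)
--     return best[1] if best is not None else submitted
-- ===== Notes on version B (the rewrite author's own statement) =====
-- stated objective: alternative
-- what changed: A scans valid_labels up to three times (exact match, then prefix equality, then prefix containment); B makes a single pass computing each label's normalization once, assigning it a priority 1/2/3 and keeping the earliest label with the strictly lowest priority.
import Mathlib
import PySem

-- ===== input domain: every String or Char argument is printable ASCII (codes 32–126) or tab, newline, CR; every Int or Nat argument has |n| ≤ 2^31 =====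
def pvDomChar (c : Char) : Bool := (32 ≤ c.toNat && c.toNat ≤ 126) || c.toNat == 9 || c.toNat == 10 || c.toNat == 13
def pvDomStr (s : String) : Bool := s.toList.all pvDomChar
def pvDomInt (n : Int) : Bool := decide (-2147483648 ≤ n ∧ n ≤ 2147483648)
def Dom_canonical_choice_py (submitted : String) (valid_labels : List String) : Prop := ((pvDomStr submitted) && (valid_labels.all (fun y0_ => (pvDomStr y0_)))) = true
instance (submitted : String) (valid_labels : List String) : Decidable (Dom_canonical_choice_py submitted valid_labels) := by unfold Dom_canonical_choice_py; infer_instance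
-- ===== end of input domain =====

-- B replaces A's three sequential scans of valid_labels by a single pass that tracks the
-- earliest label of lowest match priority (exact / prefix-equal / prefix-containment).


-- ===== PORT A =====
-- port of _normalize: on the printable-ASCII domain, NFD is the identity and no combining
-- marks occur, so _normalize(s) = s.lower(); ported exactly as PySem.Str.lower.
def pvNorm (s : String) : String := PySem.Str.lower s
-- s.split(" - ")[0].strip(): split never returns an empty list, so [0] never raises.
def pvPref (s : String) : String :=
  PySem.Str.strip (((PySem.Str.split? s " - ").getD []).headD "")

def canonical_choice_py (submitted : String) (valid_labels : List String) : String :=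
  let ns := pvNorm submitted
  let sp := pvPref ns
  match valid_labels.find? (fun label => pvNorm label == ns) with
  | some l => l
  | none =>
    match valid_labels.find? (fun label => pvPref (pvNorm label) == sp) with
    | some l => l
    | none =>
      match valid_labels.find? (fun label =>
          PySem.Str.isIn sp (pvPref (pvNorm label)) || PySem.Str.isIn (pvPref (pvNorm label)) sp) with
      | some l => l
      | none => submitted

-- ===== PORT B =====
-- Source B's "if best is None or p < best[0]: best = (p, label)"
def pvUpdate (best : Option (Nat × String)) (p : Nat) (label : String) : Option (Nat × String) :=
  match best with
  | none => some (p, label)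
  | some (bp, bl) => if p < bp then some (p, label) else some (bp, bl)

-- Source B's single loop: an exact normalized match (priority 1, minimal) breaks at once;
-- otherwise priorities 2/3 update best only when strictly lower (earliest label kept on ties).
def pvLoop (ns sp : String) (best : Option (Nat × String)) : List String → Option (Nat × String)
  | [] => best
  | r :: rest =>
    if pvNorm r == ns then some (1, r)
    else if pvPref (pvNorm r) == sp then pvLoop ns sp (pvUpdate best 2 r) rest
    else if PySem.Str.isIn sp (pvPref (pvNorm r)) || PySem.Str.isIn (pvPref (pvNorm r)) sp then
      pvLoop ns sp (pvUpdate best 3 r) rest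
    else pvLoop ns sp best rest

def canonical_choice_py_alt (submitted : String) (valid_labels : List String) : String :=
  let ns := pvNorm submitted
  let sp := pvPref ns
  match pvLoop ns sp none valid_labels with
  | some (_, l) => l
  | none => submitted

-- ===== PRECONDITION & SPEC =====
def Spec_canonical_choice_py (submitted : String) (valid_labels : List String) (out : String) : Prop := out = canonical_choice_py_alt submitted valid_labels
instance (submitted : String) (valid_labels : List String) (out : String) : Decidable (Spec_canonical_choice_py submitted valid_labels out) := by unfold Spec_canonical_choice_py; infer_instance

-- ===== CLAIM (what is proved, stated in full; the proofs are below) =====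
def Claim_equal_canonical_choice_py : Prop := ∀ (submitted : String) (valid_labels : List String), Dom_canonical_choice_py submitted valid_labels → Spec_canonical_choice_py submitted valid_labels (canonical_choice_py submitted valid_labels)

-- ===== LEMMAS AND PROOFS =====

-- a best of priority 2 survives until the first exact match, which wins
theorem pv_loop2 (ns sp l : String) (ls : List String) :
    pvLoop ns sp (some (2, l)) ls =
      match ls.find? (fun label => pvNorm label == ns) with
      | some l' => some (1, l')
      | none => some (2, l) := by
  induction ls with
  | nil => rfl
  | cons r rest ih =>
    rw [pvLoop, List.find?_cons]
    cases hb1 : (pvNorm r == ns)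
    · simp only [hb1, Bool.false_eq_true, if_false]
      cases hb2 : (pvPref (pvNorm r) == sp)
      · cases hb3 : (PySem.Str.isIn sp (pvPref (pvNorm r)) || PySem.Str.isIn (pvPref (pvNorm r)) sp)
        · simpa only [hb2, hb3, Bool.false_eq_true, if_false] using ih
        · simpa only [hb2, hb3, Bool.false_eq_true, if_false, if_true, pvUpdate,
            show ¬(3:Nat) < 2 by omega] using ih
      · simpa only [hb2, if_true, pvUpdate, show ¬(2:Nat) < 2 by omega, if_false] using ih
    · simp only [hb1, if_true]

-- a best of priority 3 survives until the first exact or prefix-equal match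
theorem pv_loop3 (ns sp l : String) (ls : List String) :
    pvLoop ns sp (some (3, l)) ls =
      match ls.find? (fun label => pvNorm label == ns) with
      | some l' => some (1, l')
      | none =>
        match ls.find? (fun label => pvPref (pvNorm label) == sp) with
        | some l' => some (2, l')
        | none => some (3, l) := by
  induction ls with
  | nil => rfl
  | cons r rest ih =>
    rw [pvLoop, List.find?_cons, List.find?_cons]
    cases hb1 : (pvNorm r == ns)
    · simp only [hb1, Bool.false_eq_true, if_false]
      cases hb2 : (pvPref (pvNorm r) == sp)
      · cases hb3 : (PySem.Str.isIn sp (pvPref (pvNorm r)) || PySem.Str.isIn (pvPref (pvNorm r)) sp)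
        · simpa only [hb2, hb3, Bool.false_eq_true, if_false] using ih
        · simpa only [hb2, hb3, Bool.false_eq_true, if_false, if_true, pvUpdate,
            show ¬(3:Nat) < 3 by omega] using ih
      · simpa only [hb1, hb2, if_true, pvUpdate, show (2:Nat) < 3 by omega,
          Bool.false_eq_true, if_false] using pv_loop2 ns sp r rest
    · simp only [hb1, if_true]

-- starting with no candidate, B's single pass computes A's three-scan chain
theorem pv_loop_none (ns sp : String) (ls : List String) :
    pvLoop ns sp none ls =
      match ls.find? (fun label => pvNorm label == ns) with
      | some l => some (1, l)
      | none =>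
        match ls.find? (fun label => pvPref (pvNorm label) == sp) with
        | some l => some (2, l)
        | none =>
          match ls.find? (fun label =>
              PySem.Str.isIn sp (pvPref (pvNorm label)) || PySem.Str.isIn (pvPref (pvNorm label)) sp) with
          | some l => some (3, l)
          | none => none := by
  induction ls with
  | nil => rfl
  | cons r rest ih =>
    rw [pvLoop, List.find?_cons, List.find?_cons, List.find?_cons]
    cases hb1 : (pvNorm r == ns)
    · simp only [hb1, Bool.false_eq_true, if_false]
      cases hb2 : (pvPref (pvNorm r) == sp)
      · cases hb3 : (PySem.Str.isIn sp (pvPref (pvNorm r)) || PySem.Str.isIn (pvPref (pvNorm r)) sp)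
        · simpa only [hb2, hb3, Bool.false_eq_true, if_false] using ih
        · simpa only [hb1, hb2, hb3, Bool.false_eq_true, if_false, if_true, pvUpdate]
            using pv_loop3 ns sp r rest
      · simpa only [hb1, hb2, if_true, pvUpdate, Bool.false_eq_true, if_false]
          using pv_loop2 ns sp r rest
    · simp only [hb1, if_true]

-- ===== VERDICT (by name: the statement is the Claim_ definition above) =====
theorem canonical_choice_py_spec : Claim_equal_canonical_choice_py := by
  intro submitted valid_labels _
  unfold Spec_canonical_choice_py canonical_choice_py canonical_choice_py_alt
  simp only [pv_loop_none]
  cases valid_labels.find? (fun label => pvNorm label == pvNorm submitted) <;>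
    cases valid_labels.find? (fun label => pvPref (pvNorm label) == pvPref (pvNorm submitted)) <;>
      cases valid_labels.find? (fun label =>
          PySem.Str.isIn (pvPref (pvNorm submitted)) (pvPref (pvNorm label)) ||
            PySem.Str.isIn (pvPref (pvNorm label)) (pvPref (pvNorm submitted))) <;> rfl
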